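-- pv_equiv track=rewrite | github.com/r4576/ReagentPlatform | api/contents/reagent_property_data_Pubchem.py | data_processingD
-- ===== SOURCE A (Python) =====
-- def data_processingD(datalist):
--     datanumber_list = []
--     seconddata = []
--     for i, v in enumerate(datalist):
--         if "g" in v:
--             if '(' in v:
--                 datanumber_list.append(i)
--             else:
--                 pass
--         else:
--             datanumber_list.append(i)
--     for i in reversed(datanumber_list) :
--         seconddata.append(datalist.pop(i))
--     return datalist + seconddata
-- ===== SOURCE B (Python) =====
-- def data_processingD(datalist):
--     # single pass partition; elements containing "g" but no "(" stay in place,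
--     # everything else is moved to the back in reversed original order
--     kept, moved = [], []
--     for v in datalist:
--         if "g" in v and "(" not in v:
--             kept.append(v)
--         else:
--             moved.append(v)
--     datalist[:] = kept  # same in-place effect as A's pops
--     return kept + moved[::-1]
-- ===== Notes on version B (the rewrite author's own statement) =====
-- stated objective: simpler
-- what changed: Replaced A's two-pass scheme (collect indices via enumerate, then repeatedly datalist.pop(i) in reversed index order) by a single-pass partition into kept/moved lists, returning kept + reversed(moved); the in-place mutation of datalist is reproduced with one slice assignment.
import Mathlib
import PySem

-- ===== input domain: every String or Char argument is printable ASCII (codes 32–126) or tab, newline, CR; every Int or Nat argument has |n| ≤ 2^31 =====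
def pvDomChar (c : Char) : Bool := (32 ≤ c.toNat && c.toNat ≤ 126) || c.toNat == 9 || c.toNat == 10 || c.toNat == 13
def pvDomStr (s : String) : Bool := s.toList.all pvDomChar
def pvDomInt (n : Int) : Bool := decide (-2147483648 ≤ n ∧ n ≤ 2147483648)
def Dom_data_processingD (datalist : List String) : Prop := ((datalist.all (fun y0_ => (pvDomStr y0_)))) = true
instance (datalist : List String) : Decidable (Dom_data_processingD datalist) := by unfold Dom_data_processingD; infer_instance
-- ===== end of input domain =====

-- B replaces A's two passes (collect indices, then repeatedly pop(i)) by one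
-- partition pass and a reverse: simpler, no index bookkeeping. Both Pythons
-- mutate the argument list in place (A via pops, B via one slice assignment,
-- same final list); the equivalence proved here is about the RETURN value.

-- ===== PORT A =====
def data_processingD (datalist : List String) : List String :=
  let datanumber_list : List Int :=
    (PySem.List.enumerate datalist).foldl (fun acc p =>
      if PySem.Str.isIn "g" p.2 then
        (if PySem.Str.isIn "(" p.2 then acc ++ [p.1] else acc)
      else acc ++ [p.1]) []
  let st := datanumber_list.reverse.foldl
    (fun (st : List String × List String) i =>
      match PySem.List.pop? st.1 i with
      | some r => (r.2, st.2 ++ [r.1])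
      | none => st)   -- unreachable: every collected index is in range, pop never raises
    (datalist, [])
  st.1 ++ st.2

-- ===== PORT B =====
def data_processingD_alt (datalist : List String) : List String :=
  let pr := datalist.foldl
    (fun (st : List String × List String) v =>
      if PySem.Str.isIn "g" v && !PySem.Str.isIn "(" v then (st.1 ++ [v], st.2)
      else (st.1, st.2 ++ [v]))
    ([], [])
  pr.1 ++ pr.2.reverse   -- moved[::-1]

-- ===== PRECONDITION & SPEC =====
def Spec_data_processingD (datalist : List String) (out : List String) : Prop := out = data_processingD_alt datalist
instance (datalist : List String) (out : List String) : Decidable (Spec_data_processingD datalist out) := by unfold Spec_data_processingD; infer_instance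

-- ===== CLAIM (what is proved, stated in full; the proofs are below) =====
def Claim_equal_data_processingD : Prop := ∀ (datalist : List String), Dom_data_processingD datalist → Spec_data_processingD datalist (data_processingD datalist)

-- ===== LEMMAS AND PROOFS =====

-- the element test: "g" in v and "(" not in v (stays in place)
def pvKeep (v : String) : Bool := PySem.Str.isIn "g" v && !PySem.Str.isIn "(" v

-- A's collected index list, in closed form
def pvIdx (xs : List String) : List Int :=
  ((PySem.List.enumerate xs).filter (fun p => !pvKeep p.2)).map (·.1)

-- A's pop loop
def pvPopStep (st : List String × List String) (i : Int) : List String × List String :=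
  match PySem.List.pop? st.1 i with
  | some r => (r.2, st.2 ++ [r.1])
  | none => st

theorem pvEnumerate_shift {α : Type} (xs : List α) (s : Int) :
    PySem.List.enumerate xs (s + 1) = (PySem.List.enumerate xs s).map (fun p => (p.1 + 1, p.2)) := by
  induction xs generalizing s with
  | nil => simp [PySem.List.enumerate_nil]
  | cons x t ih => simp [PySem.List.enumerate_cons, ih]

theorem pvIdx_eq (xs : List String) :
    (PySem.List.enumerate xs).foldl (fun acc p =>
      if PySem.Str.isIn "g" p.2 then
        (if PySem.Str.isIn "(" p.2 then acc ++ [p.1] else acc)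
      else acc ++ [p.1]) [] = pvIdx xs := by
  have hstep : (fun (acc : List Int) (p : Int × String) =>
      if PySem.Str.isIn "g" p.2 then
        (if PySem.Str.isIn "(" p.2 then acc ++ [p.1] else acc)
      else acc ++ [p.1])
      = (fun acc p => if (!pvKeep p.2) then acc ++ [p.1] else acc) := by
    funext acc p
    unfold pvKeep
    cases hg : PySem.Str.isIn "g" p.2 <;> cases hp : PySem.Str.isIn "(" p.2 <;> simp
  rw [hstep]
  exact (PySem.List.foldl_append_if (fun (p : Int × String) => !pvKeep p.2) (fun p => p.1)
    (PySem.List.enumerate xs) []).trans (by simp [pvIdx])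

theorem pvIdx_cons (v : String) (xs : List String) :
    pvIdx (v :: xs) = (if pvKeep v then [] else [(0 : Int)]) ++ (pvIdx xs).map (· + 1) := by
  unfold pvIdx
  rw [PySem.List.enumerate_cons, show (0 : Int) + 1 = 0 + 1 from rfl, pvEnumerate_shift]
  cases h : pvKeep v <;>
    simp [h, List.filter_map, List.map_map, Function.comp_def]

theorem pvIdx_nonneg (xs : List String) : ∀ j ∈ pvIdx xs, 0 ≤ j := by
  induction xs with
  | nil => simp [pvIdx, PySem.List.enumerate_nil]
  | cons v t ih =>
    intro j hj
    rw [pvIdx_cons] at hj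
    rcases List.mem_append.1 hj with h | h
    · cases hk : pvKeep v <;> simp [hk] at h
      all_goals omega
    · rcases List.mem_map.1 h with ⟨k, hk, rfl⟩
      have := ih k hk; omega

theorem pvPop_succ (v : String) (t : List String) (j : Int) (hj : 0 ≤ j) :
    PySem.List.pop? (v :: t) (j + 1)
      = (PySem.List.pop? t j).map (fun r => (r.1, v :: r.2)) := by
  lift j to Nat using hj with n
  by_cases h : n < t.length
  · have h1 : ((n : Int)) + 1 = (((n + 1 : Nat)) : Int) := by push_cast; ring
    rw [h1, PySem.List.pop?_natCast t n h,
        PySem.List.pop?_natCast (v :: t) (n + 1) (by simpa using Nat.succ_lt_succ h)]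
    simp
  · -- out of range on both sides: both none
    simp only [PySem.List.pop?, PySem.List.pyIdx?, List.length_cons]
    rw [if_pos (by positivity : (0:Int) ≤ (n:Int)), if_pos (by positivity : (0:Int) ≤ (n:Int) + 1)]
    rw [if_neg (by omega), if_neg (by simp; omega)]
    simp

theorem pvPopFold_shift' (js : List Int) (hjs : ∀ j ∈ js, 0 ≤ j)
    (v : String) (t sd : List String) :
    (js.map (· + 1)).foldl pvPopStep (v :: t, sd)
      = (v :: (js.foldl pvPopStep (t, sd)).1, (js.foldl pvPopStep (t, sd)).2) := by
  induction js generalizing t sd with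
  | nil => simp
  | cons j js ih =>
    have hj : 0 ≤ j := hjs j (by simp)
    have hrest : ∀ k ∈ js, 0 ≤ k := fun k hk => hjs k (by simp [hk])
    simp only [List.map_cons, List.foldl_cons]
    have hstep : pvPopStep (v :: t, sd) (j + 1)
        = (v :: (pvPopStep (t, sd) j).1, (pvPopStep (t, sd) j).2) := by
      unfold pvPopStep
      rw [pvPop_succ v t j hj]
      cases h : PySem.List.pop? t j <;> simp
    rw [hstep]
    cases hp : pvPopStep (t, sd) j with
    | mk t' sd' => exact ih hrest t' sd'

theorem pvMain (xs : List String) : ∀ sd : List String,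
    (pvIdx xs).reverse.foldl pvPopStep (xs, sd)
      = (xs.filter pvKeep, sd ++ (xs.filter (fun v => !pvKeep v)).reverse) := by
  induction xs with
  | nil => intro sd; simp [pvIdx, PySem.List.enumerate_nil]
  | cons v t ih =>
    intro sd
    rw [pvIdx_cons, List.reverse_append, List.foldl_append, List.map_reverse.symm]
    have hnn : ∀ j ∈ (pvIdx t).reverse, 0 ≤ j := by
      intro j hj; exact pvIdx_nonneg t j (List.mem_reverse.1 hj)
    rw [pvPopFold_shift' (pvIdx t).reverse hnn v t sd, ih sd]
    cases h : pvKeep v with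
    | true =>
      simp only [h, if_true, List.reverse_nil, List.foldl_nil, List.filter_cons,
        Bool.not_true]
      simp
    | false =>
      simp only [h, Bool.false_eq_true, if_false, List.reverse_cons, List.reverse_nil,
        List.nil_append, List.foldl_cons, List.foldl_nil, pvPopStep,
        PySem.List.pop?_zero_cons, List.filter_cons, Bool.not_false]
      simp

theorem pvAlt_eq (xs : List String) :
    data_processingD_alt xs = xs.filter pvKeep ++ (xs.filter (fun v => !pvKeep v)).reverse := by
  unfold data_processingD_alt
  have key : ∀ (a b : List String),
      xs.foldl (fun (st : List String × List String) v =>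
        if PySem.Str.isIn "g" v && !PySem.Str.isIn "(" v then (st.1 ++ [v], st.2)
        else (st.1, st.2 ++ [v])) (a, b)
      = (a ++ xs.filter pvKeep, b ++ xs.filter (fun v => !pvKeep v)) := by
    induction xs with
    | nil => simp
    | cons v t ih =>
      intro a b
      simp only [List.foldl_cons]
      cases h : pvKeep v with
      | true =>
        have h' := h; unfold pvKeep at h'
        rw [if_pos h', ih (a ++ [v]) b]
        simp only [List.filter_cons, h, Bool.not_true, Bool.false_eq_true, if_false, if_true]
        simp
      | false =>
        have h' := h; unfold pvKeep at h'
        rw [if_neg (by rw [h']; simp), ih a (b ++ [v])]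
        simp only [List.filter_cons, h, Bool.not_false, Bool.false_eq_true, if_false, if_true]
        simp
  rw [key [] []]
  simp

-- ===== VERDICT (by name: the statement is the Claim_ definition above) =====
theorem data_processingD_spec : Claim_equal_data_processingD := by
  intro datalist _
  unfold Spec_data_processingD data_processingD
  rw [pvIdx_eq]
  show ((pvIdx datalist).reverse.foldl pvPopStep (datalist, [])).1
      ++ ((pvIdx datalist).reverse.foldl pvPopStep (datalist, [])).2
      = data_processingD_alt datalist
  rw [pvMain datalist [], pvAlt_eq]
  simp
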